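-- pv_equiv track=rewrite | github.com/tejasai-bottu/Dynamic-Pattern-Based-Text-Steganography-with-Advance-Encryption | main.py | rearrange_chunks
-- ===== SOURCE A (Python) =====
-- def rearrange_chunks(input_text, hash_value):
--     # Group text into 1-character chunks, padding if needed
--     chunks = [input_text[i:i + 1] for i in range(0, len(input_text), 1)]
--     if len(chunks[-1]) < 1:
--         chunks[-1] = chunks[-1].ljust(1)  # Pad last chunk to ensure it's 8 characters
--
--     # Generate new order based on the hash in a reversible way
--     num_chunks = len(chunks)
--     order = sorted(range(num_chunks), key=lambda x: (x + hash_value) % num_chunks)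
--
--     # Debug: Print rearrangement order
--
--
--     rearranged_chunks = [chunks[i] for i in order]
--     return ''.join(rearranged_chunks)
-- ===== SOURCE B (Python) =====
-- def rearrange_chunks(input_text, hash_value):
--     n = len(input_text)
--     k = (-hash_value) % n
--     return input_text[k:] + input_text[:k]
-- ===== Notes on version B (the rewrite author's own statement) =====
-- stated objective: faster
-- what changed: B replaces the chunk-list build plus stable sort of indices by key (x+hash)%n with the closed-form cyclic rotation k=(-hash)%n and two slices.
import Mathlib
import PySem

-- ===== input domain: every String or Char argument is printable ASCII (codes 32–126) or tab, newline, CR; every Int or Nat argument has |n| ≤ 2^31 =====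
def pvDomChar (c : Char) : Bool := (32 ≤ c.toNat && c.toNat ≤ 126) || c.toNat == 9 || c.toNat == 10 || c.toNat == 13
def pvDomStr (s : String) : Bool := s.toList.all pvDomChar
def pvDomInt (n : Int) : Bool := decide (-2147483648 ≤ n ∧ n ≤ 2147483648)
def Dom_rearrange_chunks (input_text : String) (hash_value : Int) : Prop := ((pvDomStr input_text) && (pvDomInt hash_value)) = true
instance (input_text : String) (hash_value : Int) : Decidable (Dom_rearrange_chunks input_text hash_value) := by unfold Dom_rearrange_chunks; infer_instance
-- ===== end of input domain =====

-- B replaces A's chunk list + stable index sort by key (x+hash)%n with the closed-form rotation k=(-hash)%n and two slices (objective: faster).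

-- ===== PORT A =====
def rearrange_chunks (input_text : String) (hash_value : Int) : String :=
  let cs := input_text.toList
  -- chunks = [input_text[i:i+1] for i in range(0, len(input_text), 1)]
  let chunks : List (List Char) :=
    (PySem.List.pyRange 0 (PySem.List.len cs) 1).map
      (fun i => PySem.List.slice cs (some i) (some (i + 1)))
  -- chunks[-1] raises IndexError on empty input (excluded by Pre_)
  match PySem.List.pyGet? chunks (-1) with
  | none => ""
  | some last =>
    -- if len(chunks[-1]) < 1: chunks[-1] = chunks[-1].ljust(1)  (ljust pads with spaces)
    let chunks2 :=
      if last.length < 1 then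
        PySem.List.pySetD chunks (-1) (last ++ List.replicate (1 - last.length) ' ')
      else chunks
    let num_chunks : Int := PySem.List.len chunks2
    let order :=
      PySem.List.sorted (PySem.List.pyRange 0 num_chunks 1)
        (fun x => PySem.Int.mod (x + hash_value) num_chunks) false
    let rearranged := order.map (fun i => PySem.List.pyGetD chunks2 i [])
    String.ofList rearranged.flatten

-- ===== PORT B =====
def rearrange_chunks_alt (input_text : String) (hash_value : Int) : String :=
  let cs := input_text.toList
  let n : Int := PySem.List.len cs
  -- (-hash_value) % n raises ZeroDivisionError on empty input (excluded by Pre_)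
  match PySem.Int.mod? (-hash_value) n with
  | none => ""
  | some k =>
    String.ofList (PySem.List.slice cs (some k) none ++ PySem.List.slice cs none (some k))

-- ===== PRECONDITION & SPEC =====
-- Pre_ excludes only the empty string, on which A raises IndexError (and B raises ZeroDivisionError).
def Pre_rearrange_chunks (input_text : String) (hash_value : Int) : Prop :=
  input_text.toList ≠ []
instance (input_text : String) (hash_value : Int) : Decidable (Pre_rearrange_chunks input_text hash_value) := by unfold Pre_rearrange_chunks; infer_instance

def pvWitness_rearrange_chunks : String × Int := ("hello", 3)

def Spec_rearrange_chunks (input_text : String) (hash_value : Int) (out : String) : Prop := out = rearrange_chunks_alt input_text hash_value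
instance (input_text : String) (hash_value : Int) (out : String) : Decidable (Spec_rearrange_chunks input_text hash_value out) := by unfold Spec_rearrange_chunks; infer_instance

-- ===== CLAIM (what is proved, stated in full; the proofs are below) =====
def Claim_equal_rearrange_chunks : Prop := ∀ (input_text : String) (hash_value : Int), Dom_rearrange_chunks input_text hash_value → Pre_rearrange_chunks input_text hash_value → Spec_rearrange_chunks input_text hash_value (rearrange_chunks input_text hash_value)

-- ===== LEMMAS AND PROOFS =====

-- the sort key (x + hv) % n at 0 ≤ x < n, in terms of the rotation amount k = (-hv) % n
lemma key_formula (hv n x : Int) (hn : 0 < n) (hx0 : 0 ≤ x) (hxn : x < n) :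
    PySem.Int.mod (x + hv) n =
      if PySem.Int.mod (-hv) n ≤ x then x - PySem.Int.mod (-hv) n
      else x - PySem.Int.mod (-hv) n + n := by
  have hk0 : 0 ≤ PySem.Int.mod (-hv) n := PySem.Int.mod_nonneg _ hn
  have hkn : PySem.Int.mod (-hv) n < n := PySem.Int.mod_lt _ hn
  set k := PySem.Int.mod (-hv) n with hk
  have hdvd : n ∣ (hv + k) := by
    have h1 := PySem.Int.floordiv_mul_add_mod (-hv) n
    exact ⟨-(PySem.Int.floordiv (-hv) n), by linarith⟩
  rw [PySem.Int.mod_eq_emod_of_pos hn]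
  split_ifs with hcase
  · have h2 : (x + hv) % n = (x - k) % n := by
      apply Int.emod_eq_emod_iff_emod_sub_eq_zero.mpr
      have he : (x + hv) - (x - k) = hv + k := by ring
      rw [he]
      exact Int.emod_eq_zero_of_dvd hdvd
    rw [h2, Int.emod_eq_of_lt (by omega) (by omega)]
  · have h2 : (x + hv) % n = (x - k + n) % n := by
      apply Int.emod_eq_emod_iff_emod_sub_eq_zero.mpr
      have he : (x + hv) - (x - k + n) = (hv + k) - n := by ring
      rw [he]
      exact Int.emod_eq_zero_of_dvd (dvd_sub hdvd (dvd_refl n))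
    rw [h2, Int.emod_eq_of_lt (by omega) (by omega)]

-- the stable sort of range(n) by key (x+hv)%n is the rotation by k = (-hv)%n
lemma order_eq (hv n : Int) (hn : 0 < n) :
    PySem.List.sorted (PySem.List.pyRange 0 n 1)
        (fun x => PySem.Int.mod (x + hv) n) false
      = PySem.List.pyRange (PySem.Int.mod (-hv) n) n 1
        ++ PySem.List.pyRange 0 (PySem.Int.mod (-hv) n) 1 := by
  have hk0 : 0 ≤ PySem.Int.mod (-hv) n := PySem.Int.mod_nonneg _ hn
  have hkn : PySem.Int.mod (-hv) n < n := PySem.Int.mod_lt _ hn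
  set k := PySem.Int.mod (-hv) n with hk
  apply PySem.List.sorted_eq_of_perm_of_pairwise_lt
  · rw [PySem.List.pyRange_one_append 0 k n hk0 (le_of_lt hkn)]
    exact List.perm_append_comm
  · rw [List.pairwise_append]
    refine ⟨?_, ?_, ?_⟩
    · apply List.Pairwise.imp_of_mem ?_ (PySem.List.pairwise_lt_pyRange_one k n)
      intro a b ha hb hab
      rw [PySem.List.mem_pyRange_one] at ha hb
      rw [key_formula hv n a hn (by omega) (by omega),
          key_formula hv n b hn (by omega) (by omega)]
      rw [if_pos (by omega), if_pos (by omega)]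
      omega
    · apply List.Pairwise.imp_of_mem ?_ (PySem.List.pairwise_lt_pyRange_one 0 k)
      intro a b ha hb hab
      rw [PySem.List.mem_pyRange_one] at ha hb
      rw [key_formula hv n a hn (by omega) (by omega),
          key_formula hv n b hn (by omega) (by omega)]
      rw [if_neg (by omega), if_neg (by omega)]
      omega
    · intro a ha b hb
      rw [PySem.List.mem_pyRange_one] at ha hb
      rw [key_formula hv n a hn (by omega) (by omega),
          key_formula hv n b hn (by omega) (by omega)]
      rw [if_pos (by omega), if_neg (by omega)]
      omega

-- the characters picked by a contiguous index segment are a drop/take of the text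
lemma seg_map (cs : List Char) :
    ∀ (d a : Nat), a + d ≤ cs.length →
      ((PySem.List.pyRange (a : Int) ((a : Int) + (d : Int)) 1).map
          (fun i => PySem.List.pyGetD (cs.map (fun c => [c])) i [])).flatten
        = (cs.drop a).take d
  | 0, a, _ => by simp [PySem.List.pyRange_one_eq_nil]
  | d + 1, a, h => by
    rw [PySem.List.pyRange_one_cons (by omega)]
    simp only [List.map_cons, List.flatten_cons]
    rw [show (a : Int) + ((d + 1 : Nat) : Int) = ((a + 1 : Nat) : Int) + (d : Int) by
      push_cast; ring]
    rw [show (a : Int) + 1 = ((a + 1 : Nat) : Int) by push_cast; ring]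
    rw [seg_map cs d (a + 1) (by omega)]
    have hlt : a < cs.length := by omega
    rw [PySem.List.pyGetD_natCast, List.getD_eq_getElem _ _ (by simpa using hlt),
        List.getElem_map]
    rw [List.drop_eq_getElem_cons hlt, List.take_succ_cons]
    rfl

-- A's chunk list is the list of one-character chunks
lemma chunks_eq (cs : List Char) :
    (PySem.List.pyRange 0 ((cs.length : Nat) : Int) 1).map
        (fun i => PySem.List.slice cs (some i) (some (i + 1)))
      = cs.map (fun c => [c]) := by
  rw [PySem.List.pyRange_one, List.map_map]
  have h0 : ((cs.length : Int) - 0).toNat = cs.length := by omega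
  rw [h0]
  apply List.ext_getElem
  · simp
  · intro i h1 h2
    simp only [List.getElem_map, List.getElem_range, Function.comp_apply]
    have hi : i < cs.length := by simpa using h2
    rw [show (0 : Int) + (i : Int) + 1 = (i : Int) + ((1 : Nat) : Int) by push_cast; ring,
        show (0 : Int) + (i : Int) = ((i : Nat) : Int) by ring]
    rw [PySem.List.slice_natCast_add cs i 1]
    rw [List.drop_eq_getElem_cons hi, List.take_succ_cons, List.take_zero]

-- ===== VERDICT (by name: the statement is the Claim_ definition above) =====
theorem rearrange_chunks_spec : Claim_equal_rearrange_chunks := by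
  intro s hv _ hpre
  unfold Spec_rearrange_chunks rearrange_chunks rearrange_chunks_alt
  have hne : s.toList ≠ [] := hpre
  set cs := s.toList with hcs
  have hlen : 0 < cs.length := List.length_pos_iff.mpr hne
  simp only [PySem.List.len_eq]
  rw [chunks_eq cs]
  -- chunks[-1] is the singleton of the last character; the padding branch is dead
  rw [PySem.List.pyGet?_neg_one, List.getLast?_map,
      List.getLast?_eq_some_getLast hne]
  simp only [Option.map_some]
  rw [if_neg (by simp)]
  simp only [List.length_map]
  have hmod? : PySem.Int.mod? (-hv) ((cs.length : Nat) : Int)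
      = some (PySem.Int.mod (-hv) ((cs.length : Nat) : Int)) := by
    simp [PySem.Int.mod?]
    exact ⟨hne, rfl⟩
  have hk0 : 0 ≤ PySem.Int.mod (-hv) ((cs.length : Nat) : Int) :=
    PySem.Int.mod_nonneg _ (by omega)
  have hkn : PySem.Int.mod (-hv) ((cs.length : Nat) : Int) < ((cs.length : Nat) : Int) :=
    PySem.Int.mod_lt _ (by omega)
  set k := PySem.Int.mod (-hv) ((cs.length : Nat) : Int) with hk
  obtain ⟨kn, hknk⟩ : ∃ kn : Nat, k = (kn : Int) := ⟨k.toNat, by omega⟩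
  rw [order_eq hv ((cs.length : Nat) : Int) (by omega), ← hk,
      List.map_append, List.flatten_append, hmod?, hknk]
  dsimp only
  have hineq : kn ≤ cs.length := by omega
  have hseg1 := seg_map cs (cs.length - kn) kn (by omega)
  have hseg2 := seg_map cs kn 0 (by omega)
  simp only [Nat.cast_zero, zero_add, List.drop_zero] at hseg2
  rw [show ((cs.length : Nat) : Int) = ((kn : Nat) : Int) + ((cs.length - kn : Nat) : Int) by
        omega]
  rw [hseg1, show (0 : Int) = ((0 : Nat) : Int) from rfl]
  simp only [Nat.cast_zero] at hseg2 ⊢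
  rw [hseg2]
  rw [PySem.List.slice_from_natCast, PySem.List.slice_to_natCast]
  rw [List.take_of_length_le (by simp)]
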